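-- pv_equiv track=rewrite | github.com/qiaoyuan667/Benchmark_Analyses | src/llm_extracting_clustering/cluster_skills.py | label_clusters
-- ===== SOURCE A (Python) =====
-- def label_clusters(unique_skills, labels, counts):
--     """Generate a representative label for each cluster based on most frequent members."""
--     cluster_ids = sorted(set(labels))
--     cluster_labels = {}
--
--     for cid in cluster_ids:
--         members = [unique_skills[i] for i in range(len(labels)) if labels[i] == cid]
--         member_counts = [(s, counts.get(s, 0)) for s in members]
--         member_counts.sort(key=lambda x: -x[1])
--
--         top = member_counts[0][0]
--         label = top.replace("_", " ").title()
--         if len(label) > 50: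
--             label = label[:47] + "..."
--         cluster_labels[cid] = label
--
--     return cluster_labels
-- ===== SOURCE B (Python) =====
-- def label_clusters(unique_skills, labels, counts):
--     """Generate a representative label for each cluster based on most frequent members.
--
--     Single pass: keep, per cluster, the best (first most-frequent) member seen so far,
--     instead of rescanning and sorting the members of every cluster.
--     """
--     best = {}
--     for cid, skill in zip(labels, unique_skills):
--         c = counts.get(skill, 0)
--         if cid not in best or best[cid][1] < c:
--             best[cid] = (skill, c)
--
--     result = {}
--     for cid in sorted(best):
--         label = best[cid][0].replace("_", " ").title()
--         if len(label) > 50: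
--             label = label[:47] + "..."
--         result[cid] = label
--     return result
-- ===== Notes on version B (the rewrite author's own statement) =====
-- stated objective: faster
-- what changed: A rescans the whole label list and sorts the members of every cluster; B makes a single pass over zip(labels, unique_skills) keeping each cluster's first most-frequent member in a dict, then emits the labels over the sorted cluster ids.
import Mathlib
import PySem

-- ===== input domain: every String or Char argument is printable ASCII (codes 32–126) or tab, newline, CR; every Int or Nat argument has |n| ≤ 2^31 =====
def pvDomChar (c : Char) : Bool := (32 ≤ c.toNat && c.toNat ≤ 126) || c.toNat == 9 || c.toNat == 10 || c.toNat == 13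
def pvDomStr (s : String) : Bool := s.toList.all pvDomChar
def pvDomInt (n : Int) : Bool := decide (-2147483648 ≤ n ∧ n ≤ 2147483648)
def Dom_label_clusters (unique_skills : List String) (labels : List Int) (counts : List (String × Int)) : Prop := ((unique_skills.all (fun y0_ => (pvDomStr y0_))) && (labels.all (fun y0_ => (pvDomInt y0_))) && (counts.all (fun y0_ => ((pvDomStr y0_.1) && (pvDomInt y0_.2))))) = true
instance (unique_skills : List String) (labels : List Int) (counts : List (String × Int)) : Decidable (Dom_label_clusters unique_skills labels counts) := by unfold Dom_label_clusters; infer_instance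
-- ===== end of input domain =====

-- B replaces A's per-cluster rescan-and-sort by one pass over zip(labels, unique_skills) that keeps
-- each cluster's first most-frequent member in a dict.

-- ===== PORT A =====
-- Python str.title, exact on the ASCII domain (there 'cased' = ASCII letter): a letter after a
-- non-letter is uppercased, a letter after a letter lowercased, other characters kept and resetting.
def pyTitleChars : List Char → Bool → List Char
  | [], _ => []
  | c :: rest, prev =>
    if c.isAlpha then (if prev then c.toLower else c.toUpper) :: pyTitleChars rest true
    else c :: pyTitleChars rest false

def pyTitle (s : String) : String := String.ofList (pyTitleChars s.toList false)

-- top.replace("_", " ").title(), then the >50 truncation — the identical three lines of A and of B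
def mkLabel (top : String) : String :=
  let label := pyTitle (PySem.Str.replace top "_" " ")
  if 50 < PySem.Str.len label then PySem.Str.slice label none (some 47) ++ "..." else label

-- the body of A's `for cid in cluster_ids` loop, as a named helper;
-- the pyGetD defaults are only reachable outside Pre_ (Python raises IndexError there)
def clusterLabel (unique_skills : List String) (labels : List Int) (cd : PySem.Dict String Int) (cid : Int) : String :=
  let members := ((PySem.List.pyRange 0 (labels.length : Int) 1).filter
      (fun i => PySem.List.pyGetD labels i 0 == cid)).map (fun i => PySem.List.pyGetD unique_skills i "")
  let member_counts := PySem.List.sorted (members.map (fun s => (s, cd.getD s 0))) (fun x => -x.2) false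
  let top := (member_counts.headD ("", 0)).1
  mkLabel top

def label_clusters (unique_skills : List String) (labels : List Int) (counts : List (String × Int)) : List (Int × String) :=
  let cd := PySem.Dict.ofList counts
  let cluster_ids := PySem.List.sorted (PySem.Set.ofList labels) (fun x => x) false
  (cluster_ids.foldl (fun (cl : PySem.Dict Int String) cid =>
    cl.insert cid (clusterLabel unique_skills labels cd cid)) PySem.Dict.empty).items

-- ===== PORT B =====
-- the body of B's `for cid, skill in zip(...)` loop (`if cid not in best or best[cid][1] < c`)
def bstep (cd : PySem.Dict String Int) (b : PySem.Dict Int (String × Int)) (p : Int × String) : PySem.Dict Int (String × Int) :=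
  let c := cd.getD p.2 0
  match b.get? p.1 with
  | none => b.insert p.1 (p.2, c)
  | some q => if q.2 < c then b.insert p.1 (p.2, c) else b

-- the body of B's second loop: best[cid][0].replace(...).title() (+ truncation)
def bestLabel (best : PySem.Dict Int (String × Int)) (cid : Int) : String :=
  mkLabel (best.getD cid ("", 0)).1

def label_clusters_alt (unique_skills : List String) (labels : List Int) (counts : List (String × Int)) : List (Int × String) :=
  let cd := PySem.Dict.ofList counts
  let best := (labels.zip unique_skills).foldl (bstep cd) PySem.Dict.empty
  ((PySem.List.sorted best.keys (fun x => x) false).foldl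
    (fun (res : PySem.Dict Int String) cid => res.insert cid (bestLabel best cid)) PySem.Dict.empty).items

-- ===== PRECONDITION & SPEC =====
-- A indexes unique_skills at every position of labels: it raises IndexError iff labels is longer.
def Pre_label_clusters (unique_skills : List String) (labels : List Int) (counts : List (String × Int)) : Prop :=
  labels.length ≤ unique_skills.length
instance (unique_skills : List String) (labels : List Int) (counts : List (String × Int)) : Decidable (Pre_label_clusters unique_skills labels counts) := by unfold Pre_label_clusters; infer_instance

def pvWitness_label_clusters : List String × List Int × (List (String × Int)) :=
  (["machine_learning", "sql", "python"], [1, 0, 1], [("sql", 5), ("python", 2)])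

def Spec_label_clusters (unique_skills : List String) (labels : List Int) (counts : List (String × Int)) (out : List (Int × String)) : Prop := out = label_clusters_alt unique_skills labels counts
instance (unique_skills : List String) (labels : List Int) (counts : List (String × Int)) (out : List (Int × String)) : Decidable (Spec_label_clusters unique_skills labels counts out) := by unfold Spec_label_clusters; infer_instance

-- ===== CLAIM (what is proved, stated in full; the proofs are below) =====
def Claim_equal_label_clusters : Prop := ∀ (unique_skills : List String) (labels : List Int) (counts : List (String × Int)), Dom_label_clusters unique_skills labels counts → Pre_label_clusters unique_skills labels counts → Spec_label_clusters unique_skills labels counts (label_clusters unique_skills labels counts)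


-- ===== LEMMAS AND PROOFS =====

-- proof-only step functions for characterising B's one-pass maximum
def ostep (o : Option (String × Int)) (q : String × Int) : Option (String × Int) :=
  match o with
  | none => some q
  | some r => if r.2 < q.2 then some q else some r

def mstep (m q : String × Int) : String × Int := if m.2 < q.2 then q else m

lemma insertBy_nil {α : Type} (before : α → α → Bool) (x : α) :
    PySem.List.insertBy before x [] = [x] := rfl

lemma insertBy_cons {α : Type} (before : α → α → Bool) (x y : α) (ys : List α) :
    PySem.List.insertBy before x (y :: ys)
      = if before x y then x :: y :: ys else y :: PySem.List.insertBy before x ys := rfl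

lemma insertBy_ne_nil {α : Type} (before : α → α → Bool) (x : α) (acc : List α) :
    PySem.List.insertBy before x acc ≠ [] := by
  cases acc with
  | nil => simp [insertBy_nil]
  | cons y ys => rw [insertBy_cons]; split <;> simp

lemma headD_insertBy {α : Type} (before : α → α → Bool) (x : α) (acc : List α) (h : acc ≠ []) (d : α) :
    (PySem.List.insertBy before x acc).headD d
      = if before x (acc.headD d) then x else acc.headD d := by
  cases acc with
  | nil => exact absurd rfl h
  | cons y ys => rw [insertBy_cons]; split <;> rename_i hby <;> simp [hby]

lemma headD_foldl_insertBy {α : Type} (before : α → α → Bool) :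
    ∀ (l acc : List α), acc ≠ [] → ∀ d : α,
      (l.foldl (fun a x => PySem.List.insertBy before x a) acc).headD d
      = l.foldl (fun m x => if before x m then x else m) (acc.headD d) := by
  intro l
  induction l with
  | nil => intro acc _ d; rfl
  | cons x l ih =>
      intro acc hacc d
      simp only [List.foldl_cons]
      rw [ih _ (insertBy_ne_nil before x acc), headD_insertBy before x acc hacc]

lemma foldl_negkey : ∀ (qs : List (String × Int)) (q : String × Int),
    List.foldl (fun m x => if -x.2 < -m.2 then x else m) q qs = List.foldl mstep q qs := by
  intro qs
  induction qs with
  | nil => intro q; rfl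
  | cons x xs ih =>
      intro q
      simp only [List.foldl_cons]
      rw [show (if -x.2 < -q.2 then x else q) = mstep q x from by simp [mstep, neg_lt_neg_iff], ih]

lemma headD_sorted_neg_snd (q : String × Int) (qs : List (String × Int)) (d : String × Int) :
    (PySem.List.sorted (q :: qs) (fun x => -x.2) false).headD d = qs.foldl mstep q := by
  rw [PySem.List.sorted_eq_foldl_insertBy, List.foldl_cons, insertBy_nil,
    headD_foldl_insertBy _ qs [q] (by simp) d]
  simp only [List.headD_cons, decide_eq_true_eq]
  all_goals exact foldl_negkey qs q

lemma ofold_some : ∀ (qs : List (String × Int)) (m : String × Int),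
    qs.foldl ostep (some m) = some (qs.foldl mstep m) := by
  intro qs
  induction qs with
  | nil => intro m; rfl
  | cons q qs ih =>
      intro m
      simp only [List.foldl_cons, ostep, mstep]
      by_cases h : m.2 < q.2 <;> simp [h, ih]

lemma contains_iff_mem_keys {ν : Type} (d : PySem.Dict Int ν) (k : Int) :
    d.contains k = true ↔ k ∈ d.keys := by
  simp [PySem.Dict.contains, PySem.Dict.keys, List.any_eq_true]

lemma keys_insert_of_contains {ν : Type} (d : PySem.Dict Int ν) (k : Int) (v : ν)
    (h : d.contains k = true) : (d.insert k v).keys = d.keys := by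
  simp only [PySem.Dict.insert, h, if_true, PySem.Dict.keys, List.map_map]
  apply List.map_congr_left
  intro p _
  by_cases hb : p.1 = k <;> simp [hb]

lemma items_insert_of_not_contains {ν : Type} (d : PySem.Dict Int ν) (k : Int) (v : ν)
    (h : d.contains k = false) : (d.insert k v).items = d.items ++ [(k, v)] := by
  simp [PySem.Dict.insert, h]

lemma set_add_eq (s : List Int) (x : Int) :
    PySem.Set.add s x = if x ∈ s then s else s ++ [x] := by
  by_cases hm : x ∈ s <;> simp [PySem.Set.add, PySem.Set.contains, hm]

lemma keys_bstep (cd : PySem.Dict String Int) (b : PySem.Dict Int (String × Int)) (p : Int × String) :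
    (bstep cd b p).keys = PySem.Set.add b.keys p.1 := by
  rw [set_add_eq]
  unfold bstep
  cases hb : b.get? p.1 with
  | none =>
      have hc : b.contains p.1 = false := by rw [PySem.Dict.contains_eq_isSome_get?, hb]; rfl
      have hmem : p.1 ∉ b.keys := fun hm => by
        have h2 := (contains_iff_mem_keys b p.1).mpr hm
        rw [hc] at h2; cases h2
      rw [if_neg hmem]
      simp [PySem.Dict.keys, items_insert_of_not_contains b _ _ hc]
  | some q =>
      have hc : b.contains p.1 = true := by rw [PySem.Dict.contains_eq_isSome_get?, hb]; rfl
      rw [if_pos ((contains_iff_mem_keys b p.1).mp hc)]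
      dsimp only
      split
      · exact keys_insert_of_contains b p.1 _ hc
      · rfl

lemma keys_bfold (cd : PySem.Dict String Int) :
    ∀ (zl : List (Int × String)) (b : PySem.Dict Int (String × Int)),
      (zl.foldl (bstep cd) b).keys = zl.foldl (fun s p => PySem.Set.add s p.1) b.keys := by
  intro zl
  induction zl with
  | nil => intro b; rfl
  | cons p zl ih =>
      intro b
      simp only [List.foldl_cons]
      rw [ih, keys_bstep]

lemma get?_bfold (cd : PySem.Dict String Int) (cid : Int) :
    ∀ (zl : List (Int × String)) (b : PySem.Dict Int (String × Int)),
      ((zl.foldl (bstep cd) b).get? cid)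
      = ((zl.filter (fun p => p.1 == cid)).map (fun p => (p.2, cd.getD p.2 0))).foldl ostep (b.get? cid) := by
  intro zl
  induction zl with
  | nil => intro b; rfl
  | cons p zl ih =>
      intro b
      have hstep : (bstep cd b p).get? cid
          = if p.1 = cid then ostep (b.get? cid) (p.2, cd.getD p.2 0) else b.get? cid := by
        unfold bstep ostep
        cases hb : b.get? p.1 with
        | none =>
            by_cases hpc : p.1 = cid
            · subst hpc; simp [PySem.Dict.get?_insert, hb]
            · simp [PySem.Dict.get?_insert, hpc, Ne.symm hpc]
        | some q =>
            by_cases hpc : p.1 = cid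
            · subst hpc
              by_cases hlt : q.2 < cd.getD p.2 0 <;>
                simp [hlt, PySem.Dict.get?_insert, hb]
            · by_cases hlt : q.2 < cd.getD p.2 0 <;>
                simp [hlt, PySem.Dict.get?_insert, hpc, Ne.symm hpc]
      simp only [List.foldl_cons, List.filter_cons]
      by_cases hpc : p.1 = cid
      · simp only [hpc, beq_self_eq_true, if_true, List.map_cons, List.foldl_cons]
        rw [ih, hstep, if_pos hpc]
      · have hb : (p.1 == cid) = false := by simp [hpc]
        simp only [hb, Bool.false_eq_true, if_false]
        rw [ih, hstep, if_neg hpc]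

lemma range_filter_zip (cid : Int) :
    ∀ (ls : List Int) (us : List String), ls.length ≤ us.length →
      ((List.range ls.length).filter (fun k => ls.getD k 0 == cid)).map (fun k => us.getD k "")
      = ((ls.zip us).filter (fun p => p.1 == cid)).map (fun p => p.2) := by
  intro ls
  induction ls with
  | nil => intro us _; simp
  | cons a ls ih =>
      intro us h
      cases us with
      | nil => simp at h
      | cons u us =>
        have h' : ls.length ≤ us.length := by simpa using h
        rw [List.length_cons, List.range_succ_eq_map, List.filter_cons, List.zip_cons_cons,
          List.filter_cons]
        have htail :
            (((List.range ls.length).map Nat.succ).filter (fun k => (a :: ls).getD k 0 == cid)).map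
              (fun k => (u :: us).getD k "")
            = ((ls.zip us).filter (fun p => p.1 == cid)).map (fun p => p.2) := by
          rw [List.filter_map, List.map_map]
          rw [show ((fun k => (a :: ls).getD k 0 == cid) ∘ Nat.succ) = (fun k => ls.getD k 0 == cid) from by
            funext k; simp [List.getD_cons_succ]]
          rw [show ((fun k => (u :: us).getD k "") ∘ Nat.succ) = (fun k => us.getD k "") from by
            funext k; simp [List.getD_cons_succ]]
          exact ih us h'
        by_cases hac : a = cid
        · rw [if_pos (by simp [hac] : ((a :: ls).getD 0 0 == cid) = true),
            if_pos (by simp [hac] : (((a, u) : Int × String).1 == cid) = true),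
            List.map_cons, htail]
          simp
        · rw [if_neg (by simp [hac] : ¬ (((a :: ls).getD 0 0 == cid) = true)),
            if_neg (by simp [hac] : ¬ ((((a, u) : Int × String).1 == cid) = true)),
            htail]

lemma members_eq (us : List String) (ls : List Int) (cid : Int) (h : ls.length ≤ us.length) :
    ((PySem.List.pyRange 0 (ls.length : Int) 1).filter
        (fun i => PySem.List.pyGetD ls i 0 == cid)).map (fun i => PySem.List.pyGetD us i "")
    = ((ls.zip us).filter (fun p => p.1 == cid)).map (fun p => p.2) := by
  rw [PySem.List.pyRange_zero_natCast, List.filter_map, List.map_map]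
  rw [show ((fun i => PySem.List.pyGetD ls i 0 == cid) ∘ (fun k : ℕ => (k : Int)))
      = (fun k : ℕ => ls.getD k 0 == cid) from by
    funext k; simp [PySem.List.pyGetD_natCast, List.getD]]
  rw [show ((fun i => PySem.List.pyGetD us i "") ∘ (fun k : ℕ => (k : Int)))
      = (fun k : ℕ => us.getD k "") from by
    funext k; simp [PySem.List.pyGetD_natCast, List.getD]]
  exact range_filter_zip cid ls us h

lemma items_insert_fold (F : Int → String) :
    ∀ (l : List Int) (d : PySem.Dict Int String),
      (∀ c ∈ l, d.contains c = false) → l.Nodup →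
      (l.foldl (fun d c => d.insert c (F c)) d).items = d.items ++ l.map (fun c => (c, F c)) := by
  intro l
  induction l with
  | nil => intro d _ _; simp
  | cons c l ih =>
      intro d hfresh hnd
      simp only [List.foldl_cons, List.map_cons]
      rw [ih (d.insert c (F c)) ?_ hnd.of_cons]
      · rw [items_insert_of_not_contains d c (F c) (hfresh c (by simp))]
        simp
      · intro c' hc'
        have hne : c' ≠ c := fun hh => (List.nodup_cons.mp hnd).1 (hh ▸ hc')
        rw [PySem.Dict.contains_eq_isSome_get?, PySem.Dict.get?_insert, if_neg hne,
          ← PySem.Dict.contains_eq_isSome_get?]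
        exact hfresh c' (by simp [hc'])

lemma percid (us : List String) (ls : List Int) (cd : PySem.Dict String Int)
    (hpre : ls.length ≤ us.length) (cid : Int) (hcid : cid ∈ ls) :
    clusterLabel us ls cd cid = bestLabel ((ls.zip us).foldl (bstep cd) PySem.Dict.empty) cid := by
  simp only [clusterLabel, bestLabel]
  rw [members_eq us ls cid hpre, List.map_map]
  rw [show ((fun s => (s, cd.getD s 0)) ∘ (fun p : Int × String => p.2))
      = (fun p : Int × String => (p.2, cd.getD p.2 0)) from by funext p; rfl]
  rw [PySem.Dict.getD_eq_get?_getD, get?_bfold cd cid (ls.zip us) PySem.Dict.empty]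
  have hmem : cid ∈ (ls.zip us).map Prod.fst := by rw [List.map_fst_zip hpre]; exact hcid
  obtain ⟨p, hp, hpfst⟩ := List.mem_map.mp hmem
  have hne : (ls.zip us).filter (fun p => p.1 == cid) ≠ [] := by
    intro hnil
    have := List.filter_eq_nil_iff.mp hnil p hp
    simp [hpfst] at this
  cases hflt : (ls.zip us).filter (fun p => p.1 == cid) with
  | nil => exact absurd hflt hne
  | cons q0 qs0 =>
    rw [List.map_cons, headD_sorted_neg_snd, List.foldl_cons,
      show ostep (PySem.Dict.empty.get? cid) ((fun p : Int × String => (p.2, cd.getD p.2 0)) q0)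
        = some ((fun p : Int × String => (p.2, cd.getD p.2 0)) q0) from rfl,
      ofold_some]
    rfl

lemma foldl_add_fst (zl : List (Int × String)) (s : PySem.Set Int) :
    zl.foldl (fun s p => PySem.Set.add s p.1) s = (zl.map Prod.fst).foldl PySem.Set.add s := by
  rw [List.foldl_map]

-- ===== VERDICT (by name: the statement is the Claim_ definition above) =====
theorem label_clusters_spec : Claim_equal_label_clusters := by
  intro us ls cs _dom hpre
  unfold Spec_label_clusters
  have hpre' : ls.length ≤ us.length := hpre
  simp only [label_clusters, label_clusters_alt]
  have hkeys : ((ls.zip us).foldl (bstep (PySem.Dict.ofList cs)) PySem.Dict.empty).keys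
      = PySem.Set.ofList ls := by
    rw [keys_bfold, foldl_add_fst, List.map_fst_zip hpre']
    rfl
  rw [hkeys]
  have hpw := PySem.List.sorted_ofList_pairwise_lt (κ := Int) ls
  have hnd : (PySem.List.sorted (PySem.Set.ofList ls) (fun x => x) false).Nodup :=
    hpw.imp (fun h => ne_of_lt h)
  rw [items_insert_fold (clusterLabel us ls (PySem.Dict.ofList cs)) _ PySem.Dict.empty
      (by intro c _; rw [PySem.Dict.contains_eq_isSome_get?]; rfl) hnd]
  rw [items_insert_fold
      (bestLabel ((ls.zip us).foldl (bstep (PySem.Dict.ofList cs)) PySem.Dict.empty)) _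
      PySem.Dict.empty
      (by intro c _; rw [PySem.Dict.contains_eq_isSome_get?]; rfl) hnd]
  apply congrArg
  apply List.map_congr_left
  intro cid hcid
  have hcls : cid ∈ ls := by
    have := (PySem.List.mem_sorted _ _ _ _).mp hcid
    exact (PySem.Set.mem_ofList ls cid).mp this
  rw [percid us ls (PySem.Dict.ofList cs) hpre' cid hcls]
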